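-- pv_equiv track=rewrite | github.com/pypi-data/pypi-mirror-234 | packages/shop-scraper-hr/shop_scraper_hr-0.1.1-py3-none-any.whl/shop_scraper_hr/common.py | remove_parent_strings
-- ===== SOURCE A (Python) =====
-- def remove_parent_strings(data: list[str], /) -> list[str]:
--     """
--     Remove any strings that are parents of other strings.
--     """
--     filtered_data = []
--     for i, string in enumerate(data):
--         is_prefix = False
--         for j in range(i + 1, len(data)):
--             if data[j].startswith(string):
--                 is_prefix = True
--                 break
--         if not is_prefix:
--             filtered_data.append(string)
--
--     return filtered_data
-- ===== SOURCE B (Python) =====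
-- def remove_parent_strings(data, /):
--     """Keep strings that are not prefixes of any later string: one back-to-front
--     pass maintaining a set of all prefixes of the strings already seen."""
--     prefixes = set()
--     kept = []
--     for s in reversed(data):
--         if s not in prefixes:
--             kept.append(s)
--         for k in range(len(s) + 1):
--             prefixes.add(s[:k])
--     kept.reverse()
--     return kept
-- ===== Notes on version B (the rewrite author's own statement) =====
-- stated objective: faster
-- what changed: Replaces the nested index scan (each string compared against every later string) by a single back-to-front pass that maintains a hash set of all prefixes of the strings already seen and keeps a string iff it is not in that set.
import Mathlib
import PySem

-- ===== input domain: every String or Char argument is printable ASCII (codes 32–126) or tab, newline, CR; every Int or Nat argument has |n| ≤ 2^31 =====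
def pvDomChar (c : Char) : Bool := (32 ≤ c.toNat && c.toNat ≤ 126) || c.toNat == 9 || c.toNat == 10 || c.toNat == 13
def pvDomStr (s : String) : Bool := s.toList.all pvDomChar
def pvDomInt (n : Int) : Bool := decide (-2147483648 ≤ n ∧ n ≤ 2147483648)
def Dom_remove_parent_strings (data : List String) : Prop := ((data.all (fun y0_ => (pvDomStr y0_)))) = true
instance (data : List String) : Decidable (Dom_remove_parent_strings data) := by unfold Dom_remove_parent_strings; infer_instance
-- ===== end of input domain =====

-- B replaces A's nested index scan by one back-to-front pass over a set of prefixes of the strings already seen (alternative algorithm, same results).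

-- ===== PORT A =====
def remove_parent_strings (data : List String) : List String :=
  (PySem.List.enumerate data 0).foldl (fun filtered_data p =>
    let is_prefix := (PySem.List.pyRange (p.1 + 1) (PySem.List.len data) 1).any
        (fun j => PySem.Str.startswith (PySem.List.pyGetD data j "") p.2)
    if is_prefix = false then filtered_data ++ [p.2] else filtered_data) []

-- ===== PORT B =====
def remove_parent_strings_alt (data : List String) : List String :=
  let res := data.reverse.foldl (fun (st : List String × PySem.Set String) s =>
    let kept := if PySem.Set.contains st.2 s then st.1 else st.1 ++ [s]
    let prefixes := (PySem.List.pyRange 0 (PySem.Str.len s + 1) 1).foldl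
        (fun ps k => PySem.Set.add ps (PySem.Str.slice s none (some k))) st.2
    (kept, prefixes)) ([], PySem.Set.empty)
  res.1.reverse

-- ===== PRECONDITION & SPEC =====
def Spec_remove_parent_strings (data : List String) (out : List String) : Prop := out = remove_parent_strings_alt data
instance (data : List String) (out : List String) : Decidable (Spec_remove_parent_strings data out) := by unfold Spec_remove_parent_strings; infer_instance

-- ===== CLAIM (what is proved, stated in full; the proofs are below) =====
def Claim_equal_remove_parent_strings : Prop := ∀ (data : List String), Dom_remove_parent_strings data → Spec_remove_parent_strings data (remove_parent_strings data)

-- ===== LEMMAS AND PROOFS =====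

-- The common value: keep s iff no string after it (tail ++ extra) starts with s.
def keepW : List String → List String → List String
  | [], _ => []
  | s :: rest, extra =>
    if (rest ++ extra).any (fun t => PySem.Str.startswith t s) then keepW rest extra
    else s :: keepW rest extra

-- B's pass described on the reversed list, with S the strings already processed.
def revK : List String → List String → List String
  | [], _ => []
  | s :: rest, S =>
    (if S.any (fun t => PySem.Str.startswith t s) then [] else [s]) ++ revK rest (s :: S)

lemma foldA (full : List String) :
    ∀ (xs : List String) (k : Nat) (acc : List String), full.drop k = xs →
    (PySem.List.enumerate xs (k : Int)).foldl (fun filtered_data p =>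
      if ((PySem.List.pyRange (p.1 + 1) (PySem.List.len full) 1).any
          (fun j => PySem.Str.startswith (PySem.List.pyGetD full j "") p.2)) = false
      then filtered_data ++ [p.2] else filtered_data) acc
    = acc ++ keepW xs [] := by
  intro xs
  induction xs with
  | nil => intro k acc _; simp [PySem.List.enumerate, keepW]
  | cons s rest ih =>
    intro k acc h
    have hrest : full.drop (k + 1) = rest := by
      have hd : List.drop 1 (List.drop k full) = List.drop (k + 1) full := List.drop_drop
      rw [← hd, h]
      rfl
    have hany : (PySem.List.pyRange ((k : Int) + 1) (PySem.List.len full) 1).any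
        (fun j => PySem.Str.startswith (PySem.List.pyGetD full j "") s)
        = rest.any (fun t => PySem.Str.startswith t s) := by
      have hmap := PySem.List.map_pyGetD_pyRange full "" (a := (k : Int) + 1) (by omega)
      have htn : ((k : Int) + 1).toNat = k + 1 := by omega
      rw [htn, hrest] at hmap
      calc (PySem.List.pyRange ((k : Int) + 1) (PySem.List.len full) 1).any
            (fun j => PySem.Str.startswith (PySem.List.pyGetD full j "") s)
          = ((PySem.List.pyRange ((k : Int) + 1) (PySem.List.len full) 1).map
              (fun j => PySem.List.pyGetD full j "")).any
              (fun t => PySem.Str.startswith t s) := by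
            rw [List.any_map]; rfl
        _ = rest.any (fun t => PySem.Str.startswith t s) := by rw [hmap]
    have hcast : (k : Int) + 1 = ((k + 1 : Nat) : Int) := by push_cast; ring
    rw [PySem.List.enumerate_cons, List.foldl_cons]
    show (PySem.List.enumerate rest ((k : Int) + 1)).foldl _
        (if ((PySem.List.pyRange ((k : Int) + 1) (PySem.List.len full) 1).any
            (fun j => PySem.Str.startswith (PySem.List.pyGetD full j "") s)) = false
         then acc ++ [s] else acc) = acc ++ keepW (s :: rest) []
    rw [hany, hcast]
    cases hb : rest.any (fun t => PySem.Str.startswith t s) with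
    | false =>
      rw [if_pos rfl, ih (k + 1) (acc ++ [s]) hrest]
      have hk : keepW (s :: rest) [] = s :: keepW rest [] := by
        simp only [keepW, List.append_nil, hb]; rfl
      simp [hk]
    | true =>
      rw [if_neg (by simp), ih (k + 1) acc hrest]
      have hk : keepW (s :: rest) [] = keepW rest [] := by
        simp only [keepW, List.append_nil, hb]; rfl
      rw [hk]

lemma prefix_slice_iff (s x : String) :
    (∃ k ∈ PySem.List.pyRange 0 (PySem.Str.len s + 1) 1, x = PySem.Str.slice s none (some k))
    ↔ PySem.Str.startswith s x = true := by
  rw [PySem.Str.startswith_eq, PySem.Chars.startswith_iff]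
  constructor
  · rintro ⟨k, hk, rfl⟩
    rw [PySem.List.mem_pyRange_one] at hk
    have h0 : (0 : Int) ≤ k := hk.1
    have hsl : (PySem.Str.slice s none (some k)).toList = s.toList.take k.toNat := by
      rw [PySem.Str.toList_slice, PySem.Chars.slice_eq_listSlice, PySem.List.slice_to _ h0]
    rw [hsl]
    exact List.take_prefix _ _
  · intro hp
    refine ⟨(x.toList.length : Int), ?_, ?_⟩
    · rw [PySem.List.mem_pyRange_one, PySem.Str.len_eq]
      have := hp.length_le
      omega
    · apply String.toList_inj.mp
      rw [PySem.Str.toList_slice, PySem.Chars.slice_eq_listSlice,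
        PySem.List.slice_to _ (by positivity)]
      simpa using List.prefix_iff_eq_take.mp hp

lemma foldB :
    ∀ (l kept : List String) (ps : PySem.Set String) (S : List String),
    (∀ x : String, x ∈ ps ↔ ∃ t ∈ S, PySem.Str.startswith t x = true) →
    ((l.foldl (fun (st : List String × PySem.Set String) s =>
        (if PySem.Set.contains st.2 s then st.1 else st.1 ++ [s],
         (PySem.List.pyRange 0 (PySem.Str.len s + 1) 1).foldl
            (fun ps k => PySem.Set.add ps (PySem.Str.slice s none (some k))) st.2))
        (kept, ps)).1) = kept ++ revK l S := by
  intro l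
  induction l with
  | nil => intro kept ps S _; simp [revK]
  | cons s rest ih =>
    intro kept ps S hinv
    rw [List.foldl_cons]
    have hcontains : PySem.Set.contains ps s = S.any (fun t => PySem.Str.startswith t s) := by
      rcases hb : S.any (fun t => PySem.Str.startswith t s) with _ | _
      · rw [List.any_eq_false] at hb
        apply Bool.eq_false_iff.mpr
        intro hc
        obtain ⟨t, ht, hts⟩ := (hinv s).mp ((PySem.Set.contains_iff ps s).mp hc)
        exact hb t ht hts
      · rw [List.any_eq_true] at hb
        exact (PySem.Set.contains_iff ps s).mpr ((hinv s).mpr hb)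
    have hinv' : ∀ x : String,
        x ∈ (PySem.List.pyRange 0 (PySem.Str.len s + 1) 1).foldl
            (fun ps k => PySem.Set.add ps (PySem.Str.slice s none (some k))) ps
        ↔ ∃ t ∈ s :: S, PySem.Str.startswith t x = true := by
      intro x
      rw [PySem.Set.mem_foldl_add]
      constructor
      · rintro (hx | hx)
        · obtain ⟨t, ht, hh⟩ := (hinv x).mp hx
          exact ⟨t, List.mem_cons_of_mem _ ht, hh⟩
        · exact ⟨s, List.mem_cons_self, (prefix_slice_iff s x).mp hx⟩
      · rintro ⟨t, ht, hh⟩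
        rcases List.mem_cons.mp ht with rfl | ht
        · exact Or.inr ((prefix_slice_iff t x).mpr hh)
        · exact Or.inl ((hinv x).mpr ⟨t, ht, hh⟩)
    show ((rest.foldl _
        (if PySem.Set.contains ps s then kept else kept ++ [s], _)).1) = kept ++ revK (s :: rest) S
    rw [hcontains]
    cases hb : S.any (fun t => PySem.Str.startswith t s) with
    | false =>
      rw [if_neg (by simp), ih (kept ++ [s]) _ (s :: S) hinv']
      have hk : revK (s :: rest) S = [s] ++ revK rest (s :: S) := by
        simp only [revK, hb]; rfl
      simp [hk]
    | true =>
      rw [if_pos rfl, ih kept _ (s :: S) hinv']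
      have hk : revK (s :: rest) S = revK rest (s :: S) := by
        simp only [revK, hb]; rfl
      rw [hk]

lemma keepW_snoc (xs : List String) (s : String) (S : List String) :
    keepW (xs ++ [s]) S
    = keepW xs (s :: S) ++ (if S.any (fun t => PySem.Str.startswith t s) then [] else [s]) := by
  induction xs generalizing S with
  | nil => simp [keepW]
  | cons x xs ih =>
    simp only [List.cons_append, keepW, List.append_assoc, List.nil_append, ih]
    split_ifs <;> simp

lemma revK_eq (l S : List String) : revK l S = (keepW l.reverse S).reverse := by
  induction l generalizing S with
  | nil => simp [revK, keepW]
  | cons s rest ih =>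
    simp only [revK, List.reverse_cons, keepW_snoc, List.reverse_append, ih]
    split_ifs <;> simp

-- ===== VERDICT (by name: the statement is the Claim_ definition above) =====
theorem remove_parent_strings_spec : Claim_equal_remove_parent_strings := by
  intro data _
  show remove_parent_strings data = remove_parent_strings_alt data
  have hA : remove_parent_strings data = keepW data [] := by
    have hfa := foldA data data 0 [] rfl
    simpa [remove_parent_strings] using hfa
  have hB : remove_parent_strings_alt data = keepW data [] := by
    have hf := foldB data.reverse [] PySem.Set.empty []
      (by intro x; simp [PySem.Set.empty])
    show (data.reverse.foldl (fun (st : List String × PySem.Set String) s =>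
        (if PySem.Set.contains st.2 s then st.1 else st.1 ++ [s],
         (PySem.List.pyRange 0 (PySem.Str.len s + 1) 1).foldl
            (fun ps k => PySem.Set.add ps (PySem.Str.slice s none (some k))) st.2))
        ([], PySem.Set.empty)).1.reverse = keepW data []
    rw [hf, List.nil_append, revK_eq, List.reverse_reverse, List.reverse_reverse]
  rw [hA, hB]
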